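-- pv_equiv track=rewrite | github.com/maliha1234/ContractFolder | max_min_feature_version_marium.py | arith_opc_block
-- ===== SOURCE A (Python) =====
-- def arith_opc_block(dir,dict,label,smart_contract_name):
--     opc_dict=dict
--     #Number of arithmetic operation in a single block
--     numdict=opc_dict
--     numdict_track={}
--     arit_opc = ["ADD","MUL","SUB","DIV","SDIV","SMOD","ADDMOD","MULMOD","EXP","SIGNEXTEND"]
--     for key in numdict:
--         count=0;
--         for value in numdict[key]:
--             if value in arit_opc:
--                 count=count+1;
--         numdict_track[key]=count;
--
--     return numdict_track
-- ===== SOURCE B (Python) =====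
-- ARIT_OPC = ["ADD", "MUL", "SUB", "DIV", "SDIV", "SMOD", "ADDMOD", "MULMOD", "EXP", "SIGNEXTEND"]
--
--
-- def _block_count(values):
--     # ten staged scans: one full values.count pass per fixed arithmetic opcode
--     return sum(values.count(op) for op in ARIT_OPC)
--
--
-- def arith_opc_block(dir, dict, label, smart_contract_name):
--     return {key: _block_count(values) for key, values in dict.items()}
-- ===== Notes on version B (the rewrite author's own statement) =====
-- stated objective: idiomatic
-- what changed: Inverts the inner loop: instead of scanning each block's values once testing membership in the 10-opcode list, B makes one values.count pass per opcode and sums the ten counts, in a dict comprehension with a helper.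
import Mathlib
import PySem

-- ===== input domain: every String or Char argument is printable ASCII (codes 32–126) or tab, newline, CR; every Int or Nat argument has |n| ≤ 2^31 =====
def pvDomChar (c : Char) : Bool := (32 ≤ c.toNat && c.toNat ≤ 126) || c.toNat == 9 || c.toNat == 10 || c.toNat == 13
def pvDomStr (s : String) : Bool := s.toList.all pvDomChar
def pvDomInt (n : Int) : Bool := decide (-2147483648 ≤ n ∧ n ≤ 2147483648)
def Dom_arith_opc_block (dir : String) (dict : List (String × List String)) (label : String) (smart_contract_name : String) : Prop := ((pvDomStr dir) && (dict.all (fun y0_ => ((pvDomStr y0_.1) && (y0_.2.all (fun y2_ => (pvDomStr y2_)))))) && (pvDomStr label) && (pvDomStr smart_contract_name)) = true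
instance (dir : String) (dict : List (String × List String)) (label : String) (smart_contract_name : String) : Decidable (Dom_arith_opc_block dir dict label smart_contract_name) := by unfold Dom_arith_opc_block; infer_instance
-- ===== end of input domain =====

-- B: same per-block counts, computed by one values.count pass per fixed opcode summed up (idiomatic loop inversion; same cost).
-- ===== PORT A =====
-- A's arit_opc list (B's ARIT_OPC is the identical literal)
def pvAritOpc : List String := ["ADD", "MUL", "SUB", "DIV", "SDIV", "SMOD", "ADDMOD", "MULMOD", "EXP", "SIGNEXTEND"]

def arith_opc_block (dir : String) (dict : List (String × List String)) (label : String) (smart_contract_name : String) : List (String × Int) :=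
  dict.foldl (fun numdict_track kv =>
    numdict_track ++ [(kv.1, kv.2.foldl (fun count value => if pvAritOpc.contains value then count + 1 else count) 0)]) []

-- ===== PORT B =====
-- Source B's _block_count helper: sum(values.count(op) for op in ARIT_OPC)
def pvBlockCount (values : List String) : Int :=
  (pvAritOpc.map (fun op => ((values.count op : Int)))).sum

def arith_opc_block_alt (dir : String) (dict : List (String × List String)) (label : String) (smart_contract_name : String) : List (String × Int) :=
  dict.map (fun kv => (kv.1, pvBlockCount kv.2))

-- ===== PRECONDITION & SPEC =====
def Spec_arith_opc_block (dir : String) (dict : List (String × List String)) (label : String) (smart_contract_name : String) (out : List (String × Int)) : Prop := out = arith_opc_block_alt dir dict label smart_contract_name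
instance (dir : String) (dict : List (String × List String)) (label : String) (smart_contract_name : String) (out : List (String × Int)) : Decidable (Spec_arith_opc_block dir dict label smart_contract_name out) := by unfold Spec_arith_opc_block; infer_instance

-- ===== CLAIM (what is proved, stated in full; the proofs are below) =====
def Claim_equal_arith_opc_block : Prop := ∀ (dir : String) (dict : List (String × List String)) (label : String) (smart_contract_name : String), Dom_arith_opc_block dir dict label smart_contract_name → Spec_arith_opc_block dir dict label smart_contract_name (arith_opc_block dir dict label smart_contract_name)

-- ===== LEMMAS AND PROOFS =====
-- per-block counts agree: summing the 10 per-opcode counts counts the members of the (duplicate-free) opcode list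
theorem pv_sum_counts (vs : List String) :
    pvBlockCount vs = (vs.countP (fun v => pvAritOpc.contains v) : Int) := by
  unfold pvBlockCount
  induction vs with
  | nil => decide
  | cons v vs ih =>
      simp only [List.count_cons, List.countP_cons]
      push_cast
      rw [PySem.List.sum_map_add_int, ih, PySem.List.sum_map_ite_one_zero]
      have hb : (BEq.beq v : String → Bool) = (fun op => op == v) := funext fun op => by simp [eq_comm]
      have h : pvAritOpc.countP (fun op => op == v) = if pvAritOpc.contains v then 1 else 0 := by
        by_cases hv : v ∈ pvAritOpc
        · rw [if_pos (by simpa using hv)]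
          simpa [List.count] using List.count_eq_one_of_mem (by decide) hv
        · rw [if_neg (by simpa using hv)]
          simpa [List.count] using List.count_eq_zero_of_not_mem hv
      rw [hb, h]
      split_ifs <;> push_cast <;> ring

-- ===== VERDICT (by name: the statement is the Claim_ definition above) =====
theorem arith_opc_block_spec : Claim_equal_arith_opc_block := by
  intro dir dict label scn _
  unfold Spec_arith_opc_block arith_opc_block arith_opc_block_alt
  rw [PySem.List.foldl_append_singleton_eq_map]
  apply List.map_congr_left
  intro kv _
  simp only [PySem.List.foldl_if_add_one, pv_sum_counts, zero_add]
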